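-- pv_equiv track=rewrite | github.com/pp67yu/CodeChef | NOV2019/SIMGAM.py | calc
-- ===== SOURCE A (Python) =====
-- def clean(rows):
--     while [] in rows:
--         rows.remove([])
--     return rows
--
-- def chef(rows):
--     # chef choice: - max first number of rows
--     if len(rows) == 1:
--         return rows[0][0], clean([rows[0][1:]])
--
--     L = list(zip(*rows))[0]
--     n = max(L)
--
--     # remove n from correct list.
--     row = L.index(n)
--     rows[row].pop(0)
--
--     return n, clean(rows)
--
-- def rams(rows):
--     if len(rows) == 1:
--         return rows[0][-1], clean([rows[0][:-1]])
--
--     L = []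
--
--     for r in rows:
--         L.append(r[-1])
--
--     n = min(L)
--
--     row = L.index(n)
--     rows[row].pop()
--
--     return n, clean(rows)
--
-- def calc(rows):
--     count = 0
--     ch = 0
--     ra = 0
--
--     while len(rows) > 0:
--         if count % 2 == 0:
--             n, rows = chef(rows)
--             ch += n
--         else:
--             n, rows = rams(rows)
--             ra += n
--         count += 1
--
--     return ch
-- ===== SOURCE B (Python) =====
-- # Re-implementation: per-row index windows (lo, hi) over untouched rows with a fused
-- # first-argmax/argmin scan and O(1) window updates -- no pop(0) shifting, no zip
-- # column building, no clean() rescan.  Return value only: A mutates its argument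
-- # in place (pops elements from the rows); B leaves the argument untouched.
--
-- def _pick(ws, key, better):
--     bi = 0
--     bv = key(ws[0])
--     i = 0
--     for w in ws:
--         v = key(w)
--         if better(v, bv):
--             bi, bv = i, v
--         i += 1
--     return bi, bv
--
--
-- def _shrink(ws, bi, front):
--     r, lo, hi = ws[bi]
--     if lo + 1 == hi:
--         return ws[:bi] + ws[bi + 1:]
--     ws[bi] = (r, lo + 1, hi) if front else (r, lo, hi - 1)
--     return ws
--
--
-- def calc(rows):
--     ws = [(r, 0, len(r)) for r in rows if r]
--     ch = 0
--     turn = 0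
--     while ws:
--         if turn % 2 == 0:
--             bi, bv = _pick(ws, lambda w: w[0][w[1]], lambda a, b: a > b)
--             ch += bv
--             ws = _shrink(ws, bi, True)
--         else:
--             bi, bv = _pick(ws, lambda w: w[0][w[2] - 1], lambda a, b: a < b)
--             ws = _shrink(ws, bi, False)
--         turn += 1
--     return ch
-- ===== Notes on version B (the rewrite author's own statement) =====
-- stated objective: faster
-- what changed: Replaces A's per-turn list mutation (zip column build, list.index, pop(0), clean() rescan) by per-row (lo,hi) index windows over the untouched rows, a fused first-argmax/argmin scan, and an O(1) window-shrink update, so a turn costs O(#rows) instead of O(remaining elements).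
import Mathlib
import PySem

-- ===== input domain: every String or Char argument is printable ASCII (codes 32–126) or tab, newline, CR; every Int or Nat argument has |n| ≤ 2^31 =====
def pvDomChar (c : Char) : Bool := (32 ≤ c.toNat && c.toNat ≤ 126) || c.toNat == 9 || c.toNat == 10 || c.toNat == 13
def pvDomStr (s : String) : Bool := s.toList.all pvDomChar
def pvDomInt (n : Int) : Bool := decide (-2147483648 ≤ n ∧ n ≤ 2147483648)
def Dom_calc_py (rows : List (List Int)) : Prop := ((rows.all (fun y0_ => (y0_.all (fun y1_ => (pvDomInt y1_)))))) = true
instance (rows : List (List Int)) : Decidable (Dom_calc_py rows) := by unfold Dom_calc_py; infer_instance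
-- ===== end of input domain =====

-- B replaces A's per-turn list mutation (zip column, list.index, pop(0), clean() rescan) by
-- per-row (lo, hi) index windows over the untouched rows with one fused first-argmax scan and
-- O(1) window updates; equal RETURN value — A mutates its argument in place, B does not.

-- ===== PORT A =====

-- while [] in rows: rows.remove([])
def cleanA (rows : List (List Int)) : List (List Int) :=
  if _h : ([] : List Int) ∈ rows then
    cleanA ((PySem.List.remove? rows []).getD rows)
  else rows
termination_by rows.length
decreasing_by
  rw [PySem.List.remove?_eq_some_erase rows [] _h]
  have := List.length_erase_of_mem _h
  have := List.length_pos_of_mem _h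
  simp only [Option.getD_some]
  omega

def chefA (rows : List (List Int)) : Int × List (List Int) :=
  if rows.length = 1 then
    -- rows[0][0], clean([rows[0][1:]]); the .getD defaults are unreachable under Pre_ (rows[0] nonempty)
    let r0 := (PySem.List.pyGet? rows 0).getD []
    ((PySem.List.pyGet? r0 0).getD 0, cleanA [PySem.List.slice r0 (some 1) none])
  else
    -- L = list(zip(*rows))[0]: exact when every row is nonempty (the loop invariant under Pre_)
    let L := rows.map (fun r => (PySem.List.pyGet? r 0).getD 0)
    let n := (PySem.List.max? L (fun y => y)).getD 0
    let row := (PySem.List.index? L n).getD 0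
    -- rows[row].pop(0) (the .getD fallbacks are unreachable: n ∈ L, rows[row] nonempty)
    let rows' := rows.modify row (fun r => ((PySem.List.pop? r 0).map (·.2)).getD r)
    (n, cleanA rows')

def ramsA (rows : List (List Int)) : Int × List (List Int) :=
  if rows.length = 1 then
    -- rows[0][-1], clean([rows[0][:-1]])
    let r0 := (PySem.List.pyGet? rows 0).getD []
    ((PySem.List.pyGet? r0 (-1)).getD 0, cleanA [PySem.List.slice r0 none (some (-1))])
  else
    -- for r in rows: L.append(r[-1])
    let L := rows.foldl (fun acc r => acc ++ [(PySem.List.pyGet? r (-1)).getD 0]) []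
    let n := (PySem.List.min? L (fun y => y)).getD 0
    let row := (PySem.List.index? L n).getD 0
    -- rows[row].pop()
    let rows' := rows.modify row (fun r => ((PySem.List.pop? r).map (·.2)).getD r)
    (n, cleanA rows')

-- the while loop of calc; fuel = total number of elements is exact (each turn removes one element),
-- the fuel-0 guard only makes the recursion structural; count is Python's count ≥ 0
def calcLoopA : Nat → Nat → Int → Int → List (List Int) → Int
  | 0, _, ch, _, _ => ch
  | fuel+1, count, ch, ra, rows =>
    if rows.length > 0 then
      if count % 2 = 0 then
        let p := chefA rows
        calcLoopA fuel (count+1) (ch + p.1) ra p.2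
      else
        let p := ramsA rows
        calcLoopA fuel (count+1) ch (ra + p.1) p.2
    else ch

def calc_py (rows : List (List Int)) : Int :=
  calcLoopA ((rows.map List.length).sum) 0 0 0 rows

-- ===== PORT B =====

-- _pick(ws, key, better): fused first-argmax/argmin scan; state (bi, bv, i)
def pickB (ws : List (List Int × Nat × Nat)) (key : List Int × Nat × Nat → Int)
    (better : Int → Int → Bool) : Nat × Int :=
  let s := ws.foldl
    (fun (s : Nat × Int × Nat) w =>
      let v := key w
      if better v s.2.1 then (s.2.2, v, s.2.2 + 1) else (s.1, s.2.1, s.2.2 + 1))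
    (0, key (ws.headD ([], 0, 0)), 0)
  (s.1, s.2.1)

-- _shrink(ws, bi, front); bi and the window bounds are nonnegative Python ints, ported as Nat
def shrinkB (ws : List (List Int × Nat × Nat)) (bi : Nat) (front : Bool) :
    List (List Int × Nat × Nat) :=
  let w := ws.getD bi ([], 0, 0)
  if w.2.1 + 1 = w.2.2 then ws.eraseIdx bi
  else if front then ws.set bi (w.1, w.2.1 + 1, w.2.2) else ws.set bi (w.1, w.2.1, w.2.2 - 1)

-- lambda w: w[0][w[1]]  /  lambda w: w[0][w[2]-1]  (indices in range throughout the game)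
def keyFB (w : List Int × Nat × Nat) : Int := w.1.getD w.2.1 0
def keyBB (w : List Int × Nat × Nat) : Int := w.1.getD (w.2.2 - 1) 0

def calcLoopB : Nat → Nat → Int → List (List Int × Nat × Nat) → Int
  | 0, _, ch, _ => ch
  | fuel+1, turn, ch, ws =>
    if ws.isEmpty then ch
    else if turn % 2 = 0 then
      let p := pickB ws keyFB (fun a b => a > b)
      calcLoopB fuel (turn+1) (ch + p.2) (shrinkB ws p.1 true)
    else
      let p := pickB ws keyBB (fun a b => a < b)
      calcLoopB fuel (turn+1) ch (shrinkB ws p.1 false)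

def calc_py_alt (rows : List (List Int)) : Int :=
  calcLoopB ((rows.map List.length).sum) 0 0
    ((rows.filter (fun r => !r.isEmpty)).map (fun r => (r, 0, r.length)))

-- ===== PRECONDITION & SPEC =====
-- Pre_ excludes exactly the inputs containing an empty row: there A raises IndexError
-- (rows[0][0] on a single empty row, list(zip(*rows))[0] otherwise).
def Pre_calc_py (rows : List (List Int)) : Prop := ([] : List Int) ∉ rows
instance (rows : List (List Int)) : Decidable (Pre_calc_py rows) := by unfold Pre_calc_py; infer_instance
def pvWitness_calc_py : List (List Int) := [[3, 1], [2]]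

def Spec_calc_py (rows : List (List Int)) (out : Int) : Prop := out = calc_py_alt rows
instance (rows : List (List Int)) (out : Int) : Decidable (Spec_calc_py rows out) := by unfold Spec_calc_py; infer_instance

-- ===== CLAIM (what is proved, stated in full; the proofs are below) =====
def Claim_equal_calc_py : Prop := ∀ (rows : List (List Int)), Dom_calc_py rows → Pre_calc_py rows → Spec_calc_py rows (calc_py rows)

-- ===== LEMMAS AND PROOFS =====

-- the row segment a window denotes
def absW (w : List Int × Nat × Nat) : List Int := (w.1.drop w.2.1).take (w.2.2 - w.2.1)

-- well-formed window lists
def WF (ws : List (List Int × Nat × Nat)) : Prop :=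
  ∀ w ∈ ws, w.2.1 < w.2.2 ∧ w.2.2 ≤ w.1.length

theorem absW_front {w : List Int × Nat × Nat} (h1 : w.2.1 < w.2.2) (h2 : w.2.2 ≤ w.1.length) :
    absW w = w.1.getD w.2.1 0 :: absW (w.1, w.2.1 + 1, w.2.2) := by
  obtain ⟨r, lo, hi⟩ := w
  simp only [absW] at *
  have hlo : lo < r.length := lt_of_lt_of_le h1 h2
  rw [List.drop_eq_getElem_cons hlo, List.getD_eq_getElem r 0 hlo]
  have h3 : hi - lo = (hi - (lo + 1)) + 1 := by omega
  rw [h3, List.take_succ_cons]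

theorem absW_back {w : List Int × Nat × Nat} (h1 : w.2.1 < w.2.2) (h2 : w.2.2 ≤ w.1.length) :
    absW w = absW (w.1, w.2.1, w.2.2 - 1) ++ [w.1.getD (w.2.2 - 1) 0] := by
  obtain ⟨r, lo, hi⟩ := w
  simp only [absW] at *
  have hx : hi - 1 < r.length := by omega
  have h3 : hi - lo = (hi - 1 - lo) + 1 := by omega
  rw [h3, List.take_add_one]
  congr 1
  rw [List.getElem?_drop]
  have h4 : lo + (hi - 1 - lo) = hi - 1 := by omega
  rw [h4, List.getElem?_eq_getElem hx, List.getD_eq_getElem r 0 hx]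
  rfl

theorem absW_ne_nil {w : List Int × Nat × Nat} (h1 : w.2.1 < w.2.2) (h2 : w.2.2 ≤ w.1.length) :
    absW w ≠ [] := by
  rw [absW_front h1 h2]; simp

theorem filter_erase_nil (l : List (List Int)) :
    (l.erase []).filter (fun r => !r.isEmpty) = l.filter (fun r => !r.isEmpty) := by
  induction l with
  | nil => rfl
  | cons x t ih =>
    rw [List.erase_cons]
    by_cases hx : x = []
    · subst hx; simp
    · rw [if_neg (by simpa using hx), List.filter_cons, List.filter_cons, ih]

theorem cleanA_eq (rows : List (List Int)) :
    cleanA rows = rows.filter (fun r => !r.isEmpty) := by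
  unfold cleanA
  split
  · rename_i h
    rw [PySem.List.remove?_eq_some_erase rows [] h, Option.getD_some,
        cleanA_eq (rows.erase []), filter_erase_nil]
  · rename_i h
    symm
    rw [List.filter_eq_self]
    intro a ha
    have hne : a ≠ [] := fun hh => h (hh ▸ ha)
    simp [List.isEmpty_eq_false_iff, hne]
termination_by rows.length
decreasing_by
  rename_i h
  have := List.length_erase_of_mem h
  have := List.length_pos_of_mem h
  omega

-- idxOf? / idxOf bridge at a member
theorem idxOf?_eq_some_idxOf {l : List Int} {a : Int} (h : a ∈ l) :
    l.idxOf? a = some (l.idxOf a) := by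
  induction l with
  | nil => simp at h
  | cons x t ih =>
    by_cases hx : x = a
    · subst hx; simp [List.idxOf?_cons]
    · have ha : a ∈ t := by
        cases h with
        | head => exact absurd rfl hx
        | tail _ h => exact h
      simp [List.idxOf?_cons, hx, ih ha]

-- the scan loop of _pick, as a recursion on the key list
def pk (better : Int → Int → Bool) : List Int → Nat → Int → Nat → Nat × Int
  | [], bi, bv, _ => (bi, bv)
  | v :: t, bi, bv, i => if better v bv then pk better t i v (i+1) else pk better t bi bv (i+1)

theorem pickB_eq_pk (key : List Int × Nat × Nat → Int) (better : Int → Int → Bool)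
    (ws : List (List Int × Nat × Nat)) :
    pickB ws key better = pk better (ws.map key) 0 (key (ws.headD ([], 0, 0))) 0 := by
  have aux : ∀ (l : List (List Int × Nat × Nat)) (bi i : Nat) (bv : Int),
      (((l.foldl (fun (s : Nat × Int × Nat) w =>
          let v := key w
          if better v s.2.1 then (s.2.2, v, s.2.2 + 1) else (s.1, s.2.1, s.2.2 + 1))
        (bi, bv, i))).1,
       ((l.foldl (fun (s : Nat × Int × Nat) w =>
          let v := key w
          if better v s.2.1 then (s.2.2, v, s.2.2 + 1) else (s.1, s.2.1, s.2.2 + 1))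
        (bi, bv, i))).2.1) = pk better (l.map key) bi bv i := by
    intro l
    induction l with
    | nil => intro bi i bv; rfl
    | cons w t ih =>
      intro bi i bv
      rw [List.foldl_cons, List.map_cons]
      simp only
      by_cases hb : better (key w) bv
      · simp [hb, pk, ih]
      · simp [hb, pk, ih]
  exact aux ws 0 0 (key (ws.headD ([], 0, 0)))

theorem foldl_min_le (t : List Int) : ∀ (a : Int),
    t.foldl min a ≤ a ∧ ∀ y ∈ t, t.foldl min a ≤ y := by
  induction t with
  | nil => intro a; simp
  | cons x t ih =>
    intro a
    rw [List.foldl_cons]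
    refine ⟨le_trans (ih (min a x)).1 (min_le_left a x), ?_⟩
    intro y hy
    cases hy with
    | head => exact le_trans (ih (min a x)).1 (min_le_right a x)
    | tail _ hy => exact (ih (min a x)).2 y hy

theorem pk_gt_spec (L : List Int) : ∀ (bi i : Nat) (bv : Int),
    pk (fun a b => a > b) L bi bv i =
      if bv < L.foldl max bv then (i + L.idxOf (L.foldl max bv), L.foldl max bv) else (bi, bv) := by
  induction L with
  | nil => intro bi i bv; simp [pk]
  | cons v t ih =>
    intro bi i bv
    simp only [pk, List.foldl_cons]
    by_cases hv : bv < v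
    · rw [if_pos (by simpa using hv), max_eq_right (le_of_lt hv), ih]
      have hvM := (PySem.List.le_foldl_max t v).1
      rw [if_pos (lt_of_lt_of_le hv hvM)]
      by_cases hM : v < t.foldl max v
      · rw [if_pos hM]
        have hne : v ≠ t.foldl max v := ne_of_lt hM
        rw [List.idxOf_cons, show (v == t.foldl max v) = false from by simpa using hne]
        simp only [cond_false, Prod.mk.injEq]
        exact ⟨by omega, trivial⟩
      · have heq : t.foldl max v = v := le_antisymm (not_lt.1 hM) hvM
        rw [if_neg hM, heq, List.idxOf_cons, show (v == v) = true from by simp]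
        simp
    · rw [if_neg (by simpa using hv), max_eq_left (not_lt.1 hv), ih]
      by_cases hM : bv < t.foldl max bv
      · rw [if_pos hM, if_pos hM]
        have hne : v ≠ t.foldl max bv := by omega
        rw [List.idxOf_cons, show (v == t.foldl max bv) = false from by simpa using hne]
        simp only [cond_false, Prod.mk.injEq]
        exact ⟨by omega, trivial⟩
      · rw [if_neg hM, if_neg hM]

theorem pk_lt_spec (L : List Int) : ∀ (bi i : Nat) (bv : Int),
    pk (fun a b => a < b) L bi bv i =
      if L.foldl min bv < bv then (i + L.idxOf (L.foldl min bv), L.foldl min bv) else (bi, bv) := by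
  induction L with
  | nil => intro bi i bv; simp [pk]
  | cons v t ih =>
    intro bi i bv
    simp only [pk, List.foldl_cons]
    by_cases hv : v < bv
    · rw [if_pos (by simpa using hv), min_eq_right (le_of_lt hv), ih]
      have hvM := (foldl_min_le t v).1
      rw [if_pos (lt_of_le_of_lt hvM hv)]
      by_cases hM : t.foldl min v < v
      · rw [if_pos hM]
        have hne : v ≠ t.foldl min v := (ne_of_lt hM).symm
        rw [List.idxOf_cons, show (v == t.foldl min v) = false from by simpa using hne]
        simp only [cond_false, Prod.mk.injEq]
        exact ⟨by omega, trivial⟩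
      · have heq : t.foldl min v = v := le_antisymm hvM (not_lt.1 hM)
        rw [if_neg hM, heq, List.idxOf_cons, show (v == v) = true from by simp]
        simp
    · rw [if_neg (by simpa using hv), min_eq_left (not_lt.1 hv), ih]
      by_cases hM : t.foldl min bv < bv
      · rw [if_pos hM, if_pos hM]
        have hne : v ≠ t.foldl min bv := by omega
        rw [List.idxOf_cons, show (v == t.foldl min bv) = false from by simpa using hne]
        simp only [cond_false, Prod.mk.injEq]
        exact ⟨by omega, trivial⟩
      · rw [if_neg hM, if_neg hM]

-- pick over a nonempty window list = (first index of the extremal key, extremal key)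
theorem pick_gt_eq (w0 : List Int × Nat × Nat) (wt : List (List Int × Nat × Nat)) :
    pickB (w0 :: wt) keyFB (fun a b => a > b) =
      (((w0 :: wt).map keyFB).idxOf ((wt.map keyFB).foldl max (keyFB w0)),
       (wt.map keyFB).foldl max (keyFB w0)) := by
  rw [pickB_eq_pk]
  simp only [List.headD_cons, List.map_cons, pk]
  rw [if_neg (by simp), pk_gt_spec]
  have hle := (PySem.List.le_foldl_max (wt.map keyFB) (keyFB w0)).1
  by_cases h : keyFB w0 < (wt.map keyFB).foldl max (keyFB w0)
  · rw [if_pos h, List.idxOf_cons,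
        show (keyFB w0 == (wt.map keyFB).foldl max (keyFB w0)) = false from by
          simpa using ne_of_lt h]
    simp only [cond_false, Prod.mk.injEq]
    exact ⟨by omega, trivial⟩
  · have heq : (wt.map keyFB).foldl max (keyFB w0) = keyFB w0 := le_antisymm (not_lt.1 h) hle
    rw [if_neg h, heq, List.idxOf_cons, show (keyFB w0 == keyFB w0) = true from by simp]
    simp

theorem pick_lt_eq (w0 : List Int × Nat × Nat) (wt : List (List Int × Nat × Nat)) :
    pickB (w0 :: wt) keyBB (fun a b => a < b) =
      (((w0 :: wt).map keyBB).idxOf ((wt.map keyBB).foldl min (keyBB w0)),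
       (wt.map keyBB).foldl min (keyBB w0)) := by
  rw [pickB_eq_pk]
  simp only [List.headD_cons, List.map_cons, pk]
  rw [if_neg (by simp), pk_lt_spec]
  have hle := (foldl_min_le (wt.map keyBB) (keyBB w0)).1
  by_cases h : (wt.map keyBB).foldl min (keyBB w0) < keyBB w0
  · rw [if_pos h, List.idxOf_cons,
        show (keyBB w0 == (wt.map keyBB).foldl min (keyBB w0)) = false from by
          simpa using (ne_of_lt h).symm]
    simp only [cond_false, Prod.mk.injEq]
    exact ⟨by omega, trivial⟩
  · have heq : (wt.map keyBB).foldl min (keyBB w0) = keyBB w0 := le_antisymm hle (not_lt.1 h)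
    rw [if_neg h, heq, List.idxOf_cons, show (keyBB w0 == keyBB w0) = true from by simp]
    simp

theorem WF_shrink {ws : List (List Int × Nat × Nat)} (hwf : WF ws) {bi : Nat}
    (hbi : bi < ws.length) (front : Bool) : WF (shrinkB ws bi front) := by
  have hget : ws.getD bi ([], 0, 0) = ws[bi] := List.getD_eq_getElem ws _ hbi
  have hmem : ws[bi] ∈ ws := List.getElem_mem hbi
  obtain ⟨h1, h2⟩ := hwf _ hmem
  have hrw : shrinkB ws bi front =
      if ws[bi].2.1 + 1 = ws[bi].2.2 then ws.eraseIdx bi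
      else if front then ws.set bi (ws[bi].1, ws[bi].2.1 + 1, ws[bi].2.2)
      else ws.set bi (ws[bi].1, ws[bi].2.1, ws[bi].2.2 - 1) := by
    unfold shrinkB
    rw [hget]
  rw [hrw]
  split
  · exact fun w hw => hwf w (List.mem_of_mem_eraseIdx hw)
  · rename_i hne
    split
    · intro w hw
      rcases List.mem_or_eq_of_mem_set hw with h | rfl
      · exact hwf w h
      · exact ⟨by show ws[bi].2.1 + 1 < ws[bi].2.2; omega, h2⟩
    · intro w hw
      rcases List.mem_or_eq_of_mem_set hw with h | rfl
      · exact hwf w h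
      · exact ⟨by show ws[bi].2.1 < ws[bi].2.2 - 1; omega,
               by show ws[bi].2.2 - 1 ≤ ws[bi].1.length; omega⟩

theorem filter_nonempty_set (l : List (List Int)) :
    ∀ (i : Nat) (x : List Int), (∀ y ∈ l, y ≠ []) → i < l.length →
      (l.set i x).filter (fun r => !r.isEmpty) = if x = [] then l.eraseIdx i else l.set i x := by
  induction l with
  | nil => intro i x _ hlen; exact absurd hlen (by simp)
  | cons y t ih =>
    intro i x hall hlen
    have hy : y ≠ [] := hall y List.mem_cons_self
    have htail : ∀ a ∈ t, a ≠ [] := fun a ha => hall a (List.mem_cons_of_mem y ha)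
    have htfilter : t.filter (fun r => !r.isEmpty) = t :=
      List.filter_eq_self.mpr (fun a ha => by simp [List.isEmpty_eq_false_iff, htail a ha])
    cases i with
    | zero =>
      by_cases hx : x = [] <;>
        simp [hx, htfilter, List.isEmpty_eq_false_iff]
    | succ i =>
      rw [List.set_cons_succ, List.filter_cons,
          ih i x htail (by simpa using hlen)]
      by_cases hx : x = [] <;>
        simp [hx, hy, List.isEmpty_eq_false_iff]

theorem chef_step {ws : List (List Int × Nat × Nat)} (hne : ws ≠ []) (hwf : WF ws) :
    (pickB ws keyFB (fun a b => a > b)).1 < ws.length ∧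
    chefA (ws.map absW) =
      ((pickB ws keyFB (fun a b => a > b)).2,
       (shrinkB ws (pickB ws keyFB (fun a b => a > b)).1 true).map absW) := by
  obtain ⟨w0, wt, rfl⟩ : ∃ w0 wt, ws = w0 :: wt := by
    cases ws with
    | nil => exact absurd rfl hne
    | cons a b => exact ⟨a, b, rfl⟩
  set M := (wt.map keyFB).foldl max (keyFB w0) with hM
  set bi := ((w0 :: wt).map keyFB).idxOf M with hbiDef
  have hpick : pickB (w0 :: wt) keyFB (fun a b => a > b) = (bi, M) := pick_gt_eq w0 wt
  have hmaxq : PySem.List.max? ((w0 :: wt).map keyFB) (fun y => y) = some M := by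
    rw [List.map_cons, PySem.List.max?_id_cons]
  have hMmem : M ∈ (w0 :: wt).map keyFB := PySem.List.max?_mem hmaxq
  have hidx : PySem.List.index? ((w0 :: wt).map keyFB) M
      = some (((w0 :: wt).map keyFB).idxOf M) := by
    rw [PySem.List.index?_eq_idxOf?, idxOf?_eq_some_idxOf hMmem]
  have hbilt : bi < (w0 :: wt).length := by
    have := List.idxOf_lt_length_of_mem hMmem
    simpa [hbiDef] using this
  have hnonnil : ∀ y ∈ (w0 :: wt).map absW, y ≠ [] := by
    intro y hy
    rw [List.mem_map] at hy
    obtain ⟨w, hw, rfl⟩ := hy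
    obtain ⟨h1, h2⟩ := hwf w hw
    exact absW_ne_nil h1 h2
  obtain ⟨hi1, hi2⟩ := hwf ((w0 :: wt)[bi]) (List.getElem_mem hbilt)
  have habs_wi : absW ((w0 :: wt)[bi])
      = keyFB ((w0 :: wt)[bi])
        :: absW (((w0 :: wt)[bi]).1, ((w0 :: wt)[bi]).2.1 + 1, ((w0 :: wt)[bi]).2.2) :=
    absW_front hi1 hi2
  have hshr : shrinkB (w0 :: wt) bi true
      = if ((w0 :: wt)[bi]).2.1 + 1 = ((w0 :: wt)[bi]).2.2 then (w0 :: wt).eraseIdx bi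
        else (w0 :: wt).set bi
          (((w0 :: wt)[bi]).1, ((w0 :: wt)[bi]).2.1 + 1, ((w0 :: wt)[bi]).2.2) := by
    unfold shrinkB
    rw [List.getD_eq_getElem _ _ hbilt]
    rfl
  have hheads : ((w0 :: wt).map absW).map (fun r => (PySem.List.pyGet? r 0).getD 0)
      = (w0 :: wt).map keyFB := by
    rw [List.map_map]
    apply List.map_congr_left
    intro w hw
    obtain ⟨h1, h2⟩ := hwf w hw
    simp [absW_front h1 h2, keyFB]
  have hwinew : absW (((w0 :: wt)[bi]).1, ((w0 :: wt)[bi]).2.1 + 1, ((w0 :: wt)[bi]).2.2) = []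
      ↔ ((w0 :: wt)[bi]).2.1 + 1 = ((w0 :: wt)[bi]).2.2 := by
    constructor
    · intro h
      by_contra hc
      have h1' : ((w0 :: wt)[bi]).2.1 + 1 < ((w0 :: wt)[bi]).2.2 := by omega
      exact absW_ne_nil
        (w := (((w0 :: wt)[bi]).1, ((w0 :: wt)[bi]).2.1 + 1, ((w0 :: wt)[bi]).2.2)) h1' hi2 h
    · intro h
      simp [absW, h]
  refine ⟨by rw [hpick]; simpa using hbilt, ?_⟩
  rw [hpick, hshr]
  by_cases hwt : wt = []
  · -- single-row branch of chefA
    subst hwt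
    obtain ⟨h01, h02⟩ := hwf w0 List.mem_cons_self
    have hM0 : M = keyFB w0 := by simp [hM]
    have hbi0 : bi = 0 := by rw [hbiDef, hM0]; simp
    unfold chefA
    rw [if_pos (by simp)]
    simp only [List.map_cons, List.map_nil, PySem.List.pyGet?_zero_cons, Option.getD_some,
      PySem.List.slice_from_one]
    rw [absW_front h01 h02]
    simp only [PySem.List.pyGet?_zero_cons, Option.getD_some, List.tail_cons, cleanA_eq]
    simp only [hbi0, hM0, List.getElem_cons_zero] at hwinew ⊢
    by_cases hsp : w0.2.1 + 1 = w0.2.2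
    · rw [if_pos hsp]
      have : absW (w0.1, w0.2.1 + 1, w0.2.2) = [] := hwinew.mpr hsp
      simp [this, keyFB]
    · rw [if_neg hsp]
      have : absW (w0.1, w0.2.1 + 1, w0.2.2) ≠ [] := fun h => hsp (hwinew.mp h)
      simp [this, keyFB, List.isEmpty_eq_false_iff]
  · -- general branch of chefA
    have hlen1 : ¬ ((w0 :: wt).map absW).length = 1 := by
      simp only [List.length_map, List.length_cons]
      have := List.length_pos_of_ne_nil hwt
      omega
    unfold chefA
    rw [if_neg hlen1]
    simp only [hheads, hmaxq, Option.getD_some, hidx, ← hbiDef]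
    have hmod : ((w0 :: wt).map absW).modify bi (fun r => ((PySem.List.pop? r 0).map (·.2)).getD r)
        = ((w0 :: wt).map absW).set bi
            (absW (((w0 :: wt)[bi]).1, ((w0 :: wt)[bi]).2.1 + 1, ((w0 :: wt)[bi]).2.2)) := by
      rw [List.modify_eq_set]
      congr 1
      rw [List.getElem?_eq_getElem (by simpa using hbilt)]
      simp only [Option.getD_some, List.getElem_map]
      rw [habs_wi, PySem.List.pop?_zero_cons]
      simp
    rw [hmod, cleanA_eq,
      filter_nonempty_set _ bi _ hnonnil (by simpa using hbilt)]
    by_cases hsp : ((w0 :: wt)[bi]).2.1 + 1 = ((w0 :: wt)[bi]).2.2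
    · rw [if_pos (hwinew.mpr hsp), if_pos hsp, List.eraseIdx_map]
    · rw [if_neg (fun h => hsp (hwinew.mp h)), if_neg hsp, ← List.map_set]

theorem rams_step {ws : List (List Int × Nat × Nat)} (hne : ws ≠ []) (hwf : WF ws) :
    (pickB ws keyBB (fun a b => a < b)).1 < ws.length ∧
    ramsA (ws.map absW) =
      ((pickB ws keyBB (fun a b => a < b)).2,
       (shrinkB ws (pickB ws keyBB (fun a b => a < b)).1 false).map absW) := by
  obtain ⟨w0, wt, rfl⟩ : ∃ w0 wt, ws = w0 :: wt := by
    cases ws with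
    | nil => exact absurd rfl hne
    | cons a b => exact ⟨a, b, rfl⟩
  set M := (wt.map keyBB).foldl min (keyBB w0) with hM
  set bi := ((w0 :: wt).map keyBB).idxOf M with hbiDef
  have hpick : pickB (w0 :: wt) keyBB (fun a b => a < b) = (bi, M) := pick_lt_eq w0 wt
  have hminq : PySem.List.min? ((w0 :: wt).map keyBB) (fun y => y) = some M := by
    rw [List.map_cons, PySem.List.min?_id_cons]
  have hMmem : M ∈ (w0 :: wt).map keyBB := PySem.List.min?_mem hminq
  have hidx : PySem.List.index? ((w0 :: wt).map keyBB) M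
      = some (((w0 :: wt).map keyBB).idxOf M) := by
    rw [PySem.List.index?_eq_idxOf?, idxOf?_eq_some_idxOf hMmem]
  have hbilt : bi < (w0 :: wt).length := by
    have := List.idxOf_lt_length_of_mem hMmem
    simpa [hbiDef] using this
  have hnonnil : ∀ y ∈ (w0 :: wt).map absW, y ≠ [] := by
    intro y hy
    rw [List.mem_map] at hy
    obtain ⟨w, hw, rfl⟩ := hy
    obtain ⟨h1, h2⟩ := hwf w hw
    exact absW_ne_nil h1 h2
  obtain ⟨hi1, hi2⟩ := hwf ((w0 :: wt)[bi]) (List.getElem_mem hbilt)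
  have habs_wi : absW ((w0 :: wt)[bi])
      = absW (((w0 :: wt)[bi]).1, ((w0 :: wt)[bi]).2.1, ((w0 :: wt)[bi]).2.2 - 1)
        ++ [keyBB ((w0 :: wt)[bi])] :=
    absW_back hi1 hi2
  have hshr : shrinkB (w0 :: wt) bi false
      = if ((w0 :: wt)[bi]).2.1 + 1 = ((w0 :: wt)[bi]).2.2 then (w0 :: wt).eraseIdx bi
        else (w0 :: wt).set bi
          (((w0 :: wt)[bi]).1, ((w0 :: wt)[bi]).2.1, ((w0 :: wt)[bi]).2.2 - 1) := by
    unfold shrinkB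
    rw [List.getD_eq_getElem _ _ hbilt]
    rfl
  have hlasts : ((w0 :: wt).map absW).map (fun r => (PySem.List.pyGet? r (-1)).getD 0)
      = (w0 :: wt).map keyBB := by
    rw [List.map_map]
    apply List.map_congr_left
    intro w hw
    obtain ⟨h1, h2⟩ := hwf w hw
    simp [absW_back h1 h2, PySem.List.pyGet?_neg_one_append_singleton, keyBB]
  have hwinew : absW (((w0 :: wt)[bi]).1, ((w0 :: wt)[bi]).2.1, ((w0 :: wt)[bi]).2.2 - 1) = []
      ↔ ((w0 :: wt)[bi]).2.1 + 1 = ((w0 :: wt)[bi]).2.2 := by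
    constructor
    · intro h
      by_contra hc
      have h1' : ((w0 :: wt)[bi]).2.1 < ((w0 :: wt)[bi]).2.2 - 1 := by omega
      have h2' : ((w0 :: wt)[bi]).2.2 - 1 ≤ ((w0 :: wt)[bi]).1.length := by omega
      exact absW_ne_nil
        (w := (((w0 :: wt)[bi]).1, ((w0 :: wt)[bi]).2.1, ((w0 :: wt)[bi]).2.2 - 1)) h1' h2' h
    · intro h
      have hz : ((w0 :: wt)[bi]).2.2 - 1 - ((w0 :: wt)[bi]).2.1 = 0 := by omega
      simp [absW, hz]
  refine ⟨by rw [hpick]; simpa using hbilt, ?_⟩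
  rw [hpick, hshr]
  by_cases hwt : wt = []
  · -- single-row branch of ramsA
    subst hwt
    obtain ⟨h01, h02⟩ := hwf w0 List.mem_cons_self
    have hM0 : M = keyBB w0 := by simp [hM]
    have hbi0 : bi = 0 := by rw [hbiDef, hM0]; simp
    unfold ramsA
    rw [if_pos (by simp)]
    simp only [List.map_cons, List.map_nil, PySem.List.pyGet?_zero_cons, Option.getD_some,
      PySem.List.slice_to_neg_one]
    rw [absW_back h01 h02]
    simp only [PySem.List.pyGet?_neg_one_append_singleton, Option.getD_some,
      List.dropLast_concat, cleanA_eq]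
    simp only [hbi0, hM0, List.getElem_cons_zero] at hwinew ⊢
    by_cases hsp : w0.2.1 + 1 = w0.2.2
    · rw [if_pos hsp]
      have : absW (w0.1, w0.2.1, w0.2.2 - 1) = [] := hwinew.mpr hsp
      simp [this, keyBB]
    · rw [if_neg hsp]
      have : absW (w0.1, w0.2.1, w0.2.2 - 1) ≠ [] := fun h => hsp (hwinew.mp h)
      simp [this, keyBB, List.isEmpty_eq_false_iff]
  · -- general branch of ramsA
    have hlen1 : ¬ ((w0 :: wt).map absW).length = 1 := by
      simp only [List.length_map, List.length_cons]
      have := List.length_pos_of_ne_nil hwt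
      omega
    unfold ramsA
    rw [if_neg hlen1]
    rw [PySem.List.foldl_append_singleton_eq_map (fun r => (PySem.List.pyGet? r (-1)).getD 0)
      ((w0 :: wt).map absW) []]
    simp only [List.nil_append, hlasts, hminq, Option.getD_some, hidx, ← hbiDef]
    have hmod : ((w0 :: wt).map absW).modify bi (fun r => ((PySem.List.pop? r).map (·.2)).getD r)
        = ((w0 :: wt).map absW).set bi
            (absW (((w0 :: wt)[bi]).1, ((w0 :: wt)[bi]).2.1, ((w0 :: wt)[bi]).2.2 - 1)) := by
      rw [List.modify_eq_set]
      congr 1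
      rw [List.getElem?_eq_getElem (by simpa using hbilt)]
      simp only [Option.getD_some, List.getElem_map]
      rw [habs_wi, PySem.List.pop?_last]
      simp
    rw [hmod, cleanA_eq,
      filter_nonempty_set _ bi _ hnonnil (by simpa using hbilt)]
    by_cases hsp : ((w0 :: wt)[bi]).2.1 + 1 = ((w0 :: wt)[bi]).2.2
    · rw [if_pos (hwinew.mpr hsp), if_pos hsp, List.eraseIdx_map]
    · rw [if_neg (fun h => hsp (hwinew.mp h)), if_neg hsp, ← List.map_set]

theorem loop_eq (fuel : Nat) : ∀ (count : Nat) (ch ra : Int) (ws : List (List Int × Nat × Nat)),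
    WF ws → calcLoopA fuel count ch ra (ws.map absW) = calcLoopB fuel count ch ws := by
  induction fuel with
  | zero => intro count ch ra ws _; rfl
  | succ f ih =>
    intro count ch ra ws hwf
    by_cases hws : ws = []
    · subst hws
      rfl
    · have hlen : (ws.map absW).length > 0 := by
        simp only [List.length_map]
        exact List.length_pos_of_ne_nil hws
      have hempty : ws.isEmpty = false := by simp [List.isEmpty_eq_false_iff, hws]
      simp only [calcLoopA, calcLoopB, hempty, Bool.false_eq_true, if_false, if_pos hlen]
      by_cases hc : count % 2 = 0
      · obtain ⟨hbi, hstep⟩ := chef_step hws hwf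
        rw [if_pos hc, if_pos hc, hstep]
        exact ih (count + 1) _ ra _ (WF_shrink hwf hbi true)
      · obtain ⟨hbi, hstep⟩ := rams_step hws hwf
        rw [if_neg hc, if_neg hc, hstep]
        exact ih (count + 1) ch _ _ (WF_shrink hwf hbi false)

-- ===== VERDICT (by name: the statement is the Claim_ definition above) =====
theorem calc_py_spec : Claim_equal_calc_py := by
  intro rows _ hpre
  unfold Spec_calc_py calc_py calc_py_alt
  have hfilt : rows.filter (fun r => !r.isEmpty) = rows := by
    rw [List.filter_eq_self]
    intro a ha
    have hne : a ≠ [] := fun h => hpre (h ▸ ha)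
    simp [List.isEmpty_eq_false_iff, hne]
  set ws0 := (rows.filter (fun r => !r.isEmpty)).map (fun r => (r, 0, r.length)) with hws0
  have habs : ws0.map absW = rows := by
    rw [hws0, hfilt, List.map_map]
    conv_rhs => rw [← List.map_id rows]
    apply List.map_congr_left
    intro r _
    simp [absW, List.take_length]
  have hwf : WF ws0 := by
    intro w hw
    rw [hws0, hfilt] at hw
    simp only [List.mem_map] at hw
    obtain ⟨r, hr, rfl⟩ := hw
    have : r ≠ [] := fun h => hpre (h ▸ hr)
    exact ⟨List.length_pos_of_ne_nil this, le_refl _⟩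
  rw [← habs]
  exact loop_eq _ 0 0 0 ws0 hwf
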